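-- pv_equiv track=rewrite | github.com/JiayuGeng/Garys-master-branch | 称砝码.py | process
-- ===== SOURCE A (Python) =====
-- def process(n, weight, num):
--     # 用set是为了去重，因为不同组合也可以称量相同重量的物体，但是一种重量只需要计算一次
--     res = {0}
--     for i in range(n):
--         # temp 就是每计算完一种砝码后，更新，为k专用
--         temp = res.copy()
--         for j in range(1, num[i] + 1):
--             # k就是计算之前砝码的重量 + (现在新加的砝码的重量 * 砝码数量(从1开始))
--             for k in temp:
--                 res.add(k + weight[i] * j)
--
--     # res里面记录所有可以称的重量，他们的个数就是可以称的种类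
--     return len(res)
-- ===== SOURCE B (Python) =====
-- def _union(a, b):
--     # sorted distinct union of two sorted distinct lists (two pointers)
--     out = []
--     i = j = 0
--     while i < len(a) and j < len(b):
--         x = a[i]
--         y = b[j]
--         if x < y:
--             out.append(x)
--             i += 1
--         elif y < x:
--             out.append(y)
--             j += 1
--         else:
--             out.append(x)
--             i += 1
--             j += 1
--     out.extend(a[i:])
--     out.extend(b[j:])
--     return out
--
--
-- def _expand(res, w, c):
--     # sorted distinct union of res + j*w for j in 0..max(c, 0), by binary doubling
--     if c <= 0:
--         return res
--     if c % 2 == 1: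
--         t = c // 2
--         u = _expand(res, w, t)
--         return _union(u, [x + (t + 1) * w for x in u])
--     return _union(_expand(res, w, c - 1), [x + c * w for x in res])
--
--
-- def process(n, weight, num):
--     # Aggregate duplicate weights into clamped total counts, then expand the sorted
--     # distinct list of reachable sums once per DISTINCT weight by doubling unions.
--     total = {}
--     for i in range(n):
--         w = weight[i]
--         m = num[i]
--         total[w] = total.get(w, 0) + (m if m > 0 else 0)
--     res = [0]
--     for w, c in total.items():
--         res = _expand(res, w, c)
--     return len(res)
-- ===== Notes on version B (the rewrite author's own statement) =====
-- stated objective: alternative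
-- what changed: B aggregates duplicate weights into a dict of clamped total counts, then keeps the reachable sums as a sorted duplicate-free list expanded once per distinct weight by binary-doubling two-pointer unions, instead of A's per-item triple loop that rescans a copied hash set for every multiplier.
-- outside the precondition, e.g. on process(2, [1], [2, 0]): A returns 3, B raises IndexError
import Mathlib
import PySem

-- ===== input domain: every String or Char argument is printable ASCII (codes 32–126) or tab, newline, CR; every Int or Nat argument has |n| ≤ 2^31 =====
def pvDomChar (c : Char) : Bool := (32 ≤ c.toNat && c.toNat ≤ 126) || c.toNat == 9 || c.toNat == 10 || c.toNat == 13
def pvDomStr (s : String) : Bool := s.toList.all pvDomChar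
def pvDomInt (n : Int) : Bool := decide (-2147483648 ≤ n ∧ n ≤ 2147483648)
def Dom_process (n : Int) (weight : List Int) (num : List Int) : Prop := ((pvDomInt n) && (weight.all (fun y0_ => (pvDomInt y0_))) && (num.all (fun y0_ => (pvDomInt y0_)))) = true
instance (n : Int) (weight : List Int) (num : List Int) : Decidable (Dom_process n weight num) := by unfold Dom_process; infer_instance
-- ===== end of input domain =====

-- B aggregates duplicate weights into a counter dict, then maintains the reachable sums as a
-- sorted duplicate-free list, expanded once per DISTINCT weight by doubling two-pointer unions,
-- instead of A's per-item triple loop over a mutated hash set (alternative algorithm).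

-- ===== PORT A =====
-- Literal port of A: res = {0}; for i in range(n): temp = res.copy();
-- for j in range(1, num[i]+1): for k in temp: res.add(k + weight[i]*j); return len(res).
-- The outer lambda's `res` plays temp (the pre-item copy); `res2` is the growing set.
-- Indexing num[i]/weight[i] is pyGetD with default 0: under Pre_ every index is in range.
def process (n : Int) (weight : List Int) (num : List Int) : Int :=
  PySem.Set.len
    ((PySem.List.pyRange 0 n).foldl
      (fun res i =>
        (PySem.List.pyRange 1 (PySem.List.pyGetD num i 0 + 1)).foldl
          (fun res2 j =>
            res.foldl (fun r k => PySem.Set.add r (k + PySem.List.pyGetD weight i 0 * j)) res2)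
          res)
      (PySem.Set.ofList [0]))

-- ===== PORT B =====
-- Literal port of B (Source B). Helpers first: _union (two-pointer sorted-distinct union; the
-- Python while loop's out/i/j become an accumulator recursion, out is acc reversed at the end)
-- and _expand (binary-doubling union of res + j*w for j in 0..max(c,0)).
def pvUnion : List Int → List Int → List Int → List Int
  | acc, [], b => acc.reverse ++ b
  | acc, x :: xs, [] => acc.reverse ++ (x :: xs)
  | acc, x :: xs, y :: ys =>
    if x < y then pvUnion (x :: acc) xs (y :: ys)
    else if y < x then pvUnion (y :: acc) (x :: xs) ys
    else pvUnion (x :: acc) xs ys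
termination_by _ a b => a.length + b.length

def pvExpand (res : List Int) (w : Int) (c : Int) : List Int :=
  if c ≤ 0 then res
  else if PySem.Int.mod c 2 = 1 then
    let t := PySem.Int.floordiv c 2
    let u := pvExpand res w t
    pvUnion [] u (u.map (fun x => x + (t + 1) * w))
  else
    pvUnion [] (pvExpand res w (c - 1)) (res.map (fun x => x + c * w))
termination_by c.toNat
decreasing_by
  · rw [PySem.Int.floordiv_eq_ediv_of_pos (by omega)]; omega
  · omega

-- process of Source B: total = {}; for i in range(n): total[w] = total.get(w, 0) + max(m, 0);
-- res = [0]; for (w, c) in total.items(): res = _expand(res, w, c); return len(res).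
def process_alt (n : Int) (weight : List Int) (num : List Int) : Int :=
  ((((PySem.List.pyRange 0 n).foldl
        (fun (d : PySem.Dict Int Int) i =>
          d.insert (PySem.List.pyGetD weight i 0)
            (d.getD (PySem.List.pyGetD weight i 0) 0 +
              (if PySem.List.pyGetD num i 0 > 0 then PySem.List.pyGetD num i 0 else 0)))
        PySem.Dict.empty).items.foldl
      (fun (res : List Int) wc => pvExpand res wc.1 wc.2) [0]).length : Int)

-- ===== PRECONDITION & SPEC =====
-- Pre_ excludes n > len(weight) or n > len(num), on which A raises IndexError — except that A
-- accidentally skips reading weight[i] whenever num[i] <= 0, so it still returns on a few such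
-- inputs (e.g. (2, [1], [2, 0]), where A returns 3 and B raises IndexError); those stay excluded.
def Pre_process (n : Int) (weight : List Int) (num : List Int) : Prop :=
  n ≤ (weight.length : Int) ∧ n ≤ (num.length : Int)
instance (n : Int) (weight : List Int) (num : List Int) : Decidable (Pre_process n weight num) := by unfold Pre_process; infer_instance
def pvWitness_process : Int × List Int × List Int := (2, [3, 5], [1, 2])

def Spec_process (n : Int) (weight : List Int) (num : List Int) (out : Int) : Prop := out = process_alt n weight num
instance (n : Int) (weight : List Int) (num : List Int) (out : Int) : Decidable (Spec_process n weight num out) := by unfold Spec_process; infer_instance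

-- ===== CLAIM (what is proved, stated in full; the proofs are below) =====
def Claim_equal_process : Prop := ∀ (n : Int) (weight : List Int) (num : List Int), Dom_process n weight num → Pre_process n weight num → Spec_process n weight num (process n weight num)

-- ===== LEMMAS AND PROOFS =====

-- Proof-side names for the loop bodies of the two ports (definitionally the port lambdas).
def pvStepA (weight num : List Int) (res : PySem.Set Int) (i : Int) : PySem.Set Int :=
  (PySem.List.pyRange 1 (PySem.List.pyGetD num i 0 + 1)).foldl
    (fun res2 j =>
      res.foldl (fun r k => PySem.Set.add r (k + PySem.List.pyGetD weight i 0 * j)) res2)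
    res

def pvStepD (weight num : List Int) (d : PySem.Dict Int Int) (i : Int) : PySem.Dict Int Int :=
  d.insert (PySem.List.pyGetD weight i 0)
    (d.getD (PySem.List.pyGetD weight i 0) 0 +
      (if PySem.List.pyGetD num i 0 > 0 then PySem.List.pyGetD num i 0 else 0))

def pvStepB (res : List Int) (wc : Int × Int) : List Int :=
  pvExpand res wc.1 wc.2

lemma process_eq (n : Int) (weight num : List Int) :
    process n weight num =
      PySem.Set.len ((PySem.List.pyRange 0 n).foldl (pvStepA weight num) (PySem.Set.ofList [0])) := rfl

lemma process_alt_eq (n : Int) (weight num : List Int) :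
    process_alt n weight num =
      ((((PySem.List.pyRange 0 n).foldl (pvStepD weight num) PySem.Dict.empty).items.foldl
          pvStepB [0]).length : Int) := rfl

-- "x is a sum Σ j_t * w_t with 0 ≤ j_t ≤ c_t over the (weight, count) pairs of L"
def pvR : List (Int × Int) → Int → Prop
  | [], x => x = 0
  | (w, c) :: L, x => ∃ j : Int, 0 ≤ j ∧ j ≤ c ∧ pvR L (x - w * j)

lemma foldl_preserve {α β : Type} (p : α → Prop) (g : α → β → α)
    (h : ∀ s b, p s → p (g s b)) : ∀ (l : List β) (s : α), p s → p (l.foldl g s) := by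
  intro l
  induction l with
  | nil => intro s hs; exact hs
  | cons b t ih => intro s hs; exact ih (g s b) (h s b hs)

lemma pvR_append_singleton (L : List (Int × Int)) (w c x : Int) :
    pvR (L ++ [(w, c)]) x ↔ ∃ j : Int, 0 ≤ j ∧ j ≤ c ∧ pvR L (x - w * j) := by
  induction L generalizing x with
  | nil => simp [pvR]
  | cons p t ih =>
    obtain ⟨w', c'⟩ := p
    simp only [List.cons_append, pvR]
    constructor
    · rintro ⟨j', hj'0, hj'c, h⟩
      rcases (ih _).1 h with ⟨j, hj0, hjc, h2⟩
      exact ⟨j, hj0, hjc, j', hj'0, hj'c, by rwa [sub_right_comm]⟩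
    · rintro ⟨j, hj0, hjc, j', hj'0, hj'c, h⟩
      exact ⟨j', hj'0, hj'c, (ih _).2 ⟨j, hj0, hjc, by rwa [sub_right_comm]⟩⟩

lemma map_bump_id (l : List (Int × Int)) (w : Int) (u : Int × Int)
    (h : w ∉ l.map (·.1)) :
    l.map (fun p => if (p.1 == w) = true then u else p) = l := by
  induction l with
  | nil => rfl
  | cons p t ih =>
    simp only [List.map_cons, List.mem_cons, not_or] at h
    have h1 : (p.1 == w) = false := by
      simp only [beq_eq_false_iff_ne, ne_eq]
      exact fun he => h.1 he.symm
    simp only [List.map_cons, h1, Bool.false_eq_true, if_false, ih h.2]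

lemma pvR_bump (l : List (Int × Int)) (w c0 c x : Int)
    (hnd : (l.map (·.1)).Nodup) (hmem : (w, c0) ∈ l) (hc0 : 0 ≤ c0) (hc : 0 ≤ c) :
    pvR (l.map (fun p => if (p.1 == w) = true then (w, c0 + c) else p)) x ↔
      ∃ j : Int, 0 ≤ j ∧ j ≤ c ∧ pvR l (x - w * j) := by
  induction l generalizing x with
  | nil => simp at hmem
  | cons p t ih =>
    obtain ⟨w1, c1⟩ := p
    simp only [List.map_cons, List.nodup_cons] at hnd
    by_cases hw : w1 = w
    · -- head is the bumped key
      subst hw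
      have hkey : w1 ∉ t.map (·.1) := hnd.1
      have hc1 : c1 = c0 := by
        rcases List.mem_cons.1 hmem with h | h
        · injection h with h1 h2; exact h2.symm
        · exact absurd (List.mem_map.2 ⟨(w1, c0), h, rfl⟩) hkey
      subst hc1
      simp only [List.map_cons, beq_self_eq_true, if_true, map_bump_id t w1 _ hkey, pvR]
      constructor
      · rintro ⟨j2, hj20, hj2c, h⟩
        refine ⟨j2 - min j2 c1, by omega, by omega, min j2 c1, by omega, by omega, ?_⟩
        have he : x - w1 * j2 = x - w1 * (j2 - min j2 c1) - w1 * (min j2 c1) := by ring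
        rwa [he] at h
      · rintro ⟨j, hj0, hjc, j0, hj00, hj0c, h⟩
        refine ⟨j + j0, by omega, by omega, ?_⟩
        have he : x - w1 * j - w1 * j0 = x - w1 * (j + j0) := by ring
        rwa [he] at h
    · -- head untouched
      have hne : (w1 == w) = false := beq_eq_false_iff_ne.mpr hw
      have hmem' : (w, c0) ∈ t := by
        rcases List.mem_cons.1 hmem with h | h
        · injection h with h1 h2; exact absurd h1.symm hw
        · exact h
      simp only [List.map_cons, hne, Bool.false_eq_true, if_false, pvR]
      constructor
      · rintro ⟨j1, hj10, hj1c, h⟩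
        rcases (ih hnd.2 hmem' (x := x - w1 * j1)).1 h with ⟨j, hj0, hjc, h2⟩
        exact ⟨j, hj0, hjc, j1, hj10, hj1c, by rwa [sub_right_comm]⟩
      · rintro ⟨j, hj0, hjc, j1, hj10, hj1c, h⟩
        exact ⟨j1, hj10, hj1c, (ih hnd.2 hmem' (x := x - w1 * j1)).2
          ⟨j, hj0, hjc, by rwa [sub_right_comm]⟩⟩

lemma memA_step (js : List Int) (S : PySem.Set Int) (w : Int) :
    ∀ (r0 : PySem.Set Int) (x : Int),
      x ∈ js.foldl (fun r2 j => S.foldl (fun r k => PySem.Set.add r (k + w * j)) r2) r0 ↔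
        x ∈ r0 ∨ ∃ j ∈ js, ∃ k ∈ S, x = k + w * j := by
  induction js with
  | nil => simp
  | cons j1 t ih =>
    intro r0 x
    simp only [List.foldl_cons, ih, PySem.Set.mem_foldl_add, List.mem_cons]
    constructor
    · rintro (⟨h | ⟨k, hk, he⟩⟩ | ⟨j, hj, k, hk, he⟩)
      · exact Or.inl h
      · exact Or.inr ⟨j1, Or.inl rfl, k, hk, he⟩
      · exact Or.inr ⟨j, Or.inr hj, k, hk, he⟩
    · rintro (h | ⟨j, hj | hj, k, hk, he⟩)
      · exact Or.inl (Or.inl h)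
      · exact Or.inl (Or.inr ⟨k, hk, hj ▸ he⟩)
      · exact Or.inr ⟨j, hj, k, hk, he⟩

lemma getD_zero_nonneg (d : PySem.Dict Int Int) (k : Int)
    (hpos : ∀ p ∈ d.items, 0 ≤ p.2) : 0 ≤ d.getD k 0 := by
  rw [PySem.Dict.getD_eq_get?_getD]
  cases hg : d.get? k with
  | none => simp
  | some v => simpa using hpos _ (PySem.Dict.mem_items_of_get?_eq_some d hg)

lemma pvR_insert_bump (d : PySem.Dict Int Int) (w c x : Int)
    (hnd : d.keys.Nodup) (hpos : ∀ p ∈ d.items, 0 ≤ p.2) (hc : 0 ≤ c) :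
    pvR ((d.insert w (d.getD w 0 + c)).items) x ↔
      ∃ j : Int, 0 ≤ j ∧ j ≤ c ∧ pvR d.items (x - w * j) := by
  by_cases hcon : d.contains w = true
  · have hsome : (d.get? w).isSome := by
      rw [← PySem.Dict.contains_eq_isSome_get?]; exact hcon
    obtain ⟨c0, hg⟩ := Option.isSome_iff_exists.1 hsome
    have hmem : (w, c0) ∈ d.items := PySem.Dict.mem_items_of_get?_eq_some d hg
    have hgd : d.getD w 0 = c0 := by rw [PySem.Dict.getD_eq_get?_getD, hg]; rfl
    have hnd' : (d.items.map (·.1)).Nodup := by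
      simpa only [PySem.Dict.keys] using hnd
    rw [PySem.Dict.items_insert_of_contains d _ hcon, hgd]
    exact pvR_bump d.items w c0 c x hnd' hmem (hpos _ hmem) hc
  · have hcon' : d.contains w = false := by simpa using hcon
    rw [PySem.Dict.items_insert_of_not_contains d _ hcon',
      PySem.Dict.getD_of_not_contains d 0 hcon', zero_add]
    exact pvR_append_singleton d.items w c x

lemma loop_inv (weight num : List Int) :
    ∀ (is : List Int) (S : PySem.Set Int) (d : PySem.Dict Int Int),
      d.keys.Nodup → (∀ p ∈ d.items, 0 ≤ p.2) → (∀ x, x ∈ S ↔ pvR d.items x) →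
      (∀ x, x ∈ is.foldl (pvStepA weight num) S ↔
          pvR ((is.foldl (pvStepD weight num) d).items) x) ∧
        (is.foldl (pvStepD weight num) d).keys.Nodup ∧
        (∀ p ∈ (is.foldl (pvStepD weight num) d).items, 0 ≤ p.2) := by
  intro is
  induction is with
  | nil => exact fun S d hnd hpos hm => ⟨hm, hnd, hpos⟩
  | cons i t ih =>
    intro S d hnd hpos hm
    simp only [List.foldl_cons]
    set w := PySem.List.pyGetD weight i 0 with hw
    set m := PySem.List.pyGetD num i 0 with hmdef
    have hc : (0 : Int) ≤ if m > 0 then m else 0 := by split_ifs <;> omega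
    have hnd' : (pvStepD weight num d i).keys.Nodup :=
      PySem.Dict.nodup_keys_insert d _ _ hnd
    have hpos' : ∀ p ∈ (pvStepD weight num d i).items, 0 ≤ p.2 := by
      intro p hp
      rcases (PySem.Dict.mem_items_insert d _ _ p).1 hp with h | ⟨h, _⟩
      · subst h
        exact add_nonneg (getD_zero_nonneg d w hpos) hc
      · exact hpos p h
    have hm' : ∀ x, x ∈ pvStepA weight num S i ↔ pvR ((pvStepD weight num d i).items) x := by
      intro x
      rw [show pvStepA weight num S i =
            (PySem.List.pyRange 1 (m + 1)).foldl
              (fun r2 j => S.foldl (fun r k => PySem.Set.add r (k + w * j)) r2) S from rfl,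
        memA_step,
        show pvStepD weight num d i =
          d.insert w (d.getD w 0 + if m > 0 then m else 0) from rfl,
        pvR_insert_bump d w _ x hnd hpos hc]
      constructor
      · rintro (h | ⟨j, hj, k, hk, he⟩)
        · exact ⟨0, le_refl 0, hc, by rw [mul_zero, sub_zero]; exact (hm x).1 h⟩
        · rw [PySem.List.mem_pyRange_one] at hj
          have hmpos : m > 0 := by omega
          refine ⟨j, by omega, by rw [if_pos hmpos]; omega, ?_⟩
          have : x - w * j = k := by rw [he]; ring
          rw [this]
          exact (hm k).1 hk
      · rintro ⟨j, hj0, hjc, hR⟩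
        by_cases hj : j = 0
        · subst hj
          rw [mul_zero, sub_zero] at hR
          exact Or.inl ((hm x).2 hR)
        · have hjc' : j ≤ m ∧ m > 0 := by
            by_cases hmpos : m > 0
            · rw [if_pos hmpos] at hjc; exact ⟨hjc, hmpos⟩
            · rw [if_neg hmpos] at hjc; omega
          refine Or.inr ⟨j, PySem.List.mem_pyRange_one.2 ⟨by omega, by omega⟩,
            x - w * j, (hm _).2 hR, by ring⟩
    exact ih (pvStepA weight num S i) (pvStepD weight num d i) hnd' hpos' hm'

lemma mem_pvUnion : ∀ (acc a b : List Int) (x : Int),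
    x ∈ pvUnion acc a b ↔ x ∈ acc ∨ x ∈ a ∨ x ∈ b := by
  intro acc a b x
  fun_induction pvUnion acc a b with
  | case1 => simp
  | case2 => simp
  | case3 => simp_all; tauto
  | case4 => simp_all; tauto
  | case5 a0 x0 xs y0 ys h1 h2 ih =>
    have h : x0 = y0 := by omega
    subst h
    simp_all
    tauto

lemma pairwise_pvUnion : ∀ (acc a b : List Int),
    acc.Pairwise (fun u v => v < u) → a.Pairwise (· < ·) → b.Pairwise (· < ·) →
    (∀ u ∈ acc, ∀ v ∈ a, u < v) → (∀ u ∈ acc, ∀ v ∈ b, u < v) →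
    (pvUnion acc a b).Pairwise (· < ·) := by
  intro acc a b
  fun_induction pvUnion acc a b with
  | case1 acc b =>
    intro hacc _ hb _ hab
    rw [List.pairwise_append, List.pairwise_reverse]
    exact ⟨hacc, hb, fun u hu v hv => hab u (List.mem_reverse.1 hu) v hv⟩
  | case2 acc x xs =>
    intro hacc ha _ haa _
    rw [List.pairwise_append, List.pairwise_reverse]
    exact ⟨hacc, ha, fun u hu v hv => haa u (List.mem_reverse.1 hu) v hv⟩
  | case3 acc x xs y ys hxy ih =>
    intro hacc ha hb haa hab
    rcases List.pairwise_cons.1 ha with ⟨hxxs, hxs⟩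
    rcases List.pairwise_cons.1 hb with ⟨hyys, hys⟩
    refine ih ?_ hxs hb ?_ ?_
    · exact List.pairwise_cons.2 ⟨fun u hu => haa u hu x (by simp), hacc⟩
    · intro u hu v hv
      rcases List.mem_cons.1 hu with rfl | hu
      · exact hxxs v hv
      · exact haa u hu v (by simp [hv])
    · intro u hu v hv
      rcases List.mem_cons.1 hu with rfl | hu
      · rcases List.mem_cons.1 hv with rfl | hv
        · exact hxy
        · exact lt_trans hxy (hyys v hv)
      · exact hab u hu v hv
  | case4 acc x xs y ys hxy hyx ih =>
    intro hacc ha hb haa hab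
    rcases List.pairwise_cons.1 ha with ⟨hxxs, hxs⟩
    rcases List.pairwise_cons.1 hb with ⟨hyys, hys⟩
    refine ih ?_ ha hys ?_ ?_
    · exact List.pairwise_cons.2 ⟨fun u hu => hab u hu y (by simp), hacc⟩
    · intro u hu v hv
      rcases List.mem_cons.1 hu with rfl | hu
      · rcases List.mem_cons.1 hv with rfl | hv
        · exact hyx
        · exact lt_trans hyx (hxxs v hv)
      · exact haa u hu v hv
    · intro u hu v hv
      rcases List.mem_cons.1 hu with rfl | hu
      · exact hyys v hv
      · exact hab u hu v (by simp [hv])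
  | case5 acc x xs y ys hxy hyx ih =>
    intro hacc ha hb haa hab
    have hxy' : x = y := by omega
    subst hxy'
    rcases List.pairwise_cons.1 ha with ⟨hxxs, hxs⟩
    rcases List.pairwise_cons.1 hb with ⟨hyys, hys⟩
    refine ih ?_ hxs hys ?_ ?_
    · exact List.pairwise_cons.2 ⟨fun u hu => haa u hu x (by simp), hacc⟩
    · intro u hu v hv
      rcases List.mem_cons.1 hu with rfl | hu
      · exact hxxs v hv
      · exact haa u hu v (by simp [hv])
    · intro u hu v hv
      rcases List.mem_cons.1 hu with rfl | hu
      · exact hyys v hv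
      · exact hab u hu v (by simp [hv])

lemma mem_pvExpand : ∀ (res : List Int) (w c : Int) (x : Int),
    x ∈ pvExpand res w c ↔ ∃ j : Int, 0 ≤ j ∧ j ≤ max c 0 ∧ ∃ k ∈ res, x = k + w * j := by
  intro res w c
  fun_induction pvExpand res w c with
  | case1 c hc =>
    intro x
    constructor
    · intro h
      exact ⟨0, le_refl 0, by omega, x, h, by ring⟩
    · rintro ⟨j, hj0, hjc, k, hk, he⟩
      have : j = 0 := by omega
      subst this
      have : x = k := by rw [he]; ring
      exact this ▸ hk
  | case2 c hc hodd t u ih =>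
    have hu : u = pvExpand res w t := rfl
    have h2 : PySem.Int.mod c 2 = c % 2 := PySem.Int.mod_eq_emod_of_pos (by omega)
    have hd : t = c / 2 := PySem.Int.floordiv_eq_ediv_of_pos (by omega)
    rw [h2] at hodd
    have hct : c = 2 * t + 1 := by omega
    have ht0 : 0 ≤ t := by omega
    intro x
    rw [hu, mem_pvUnion]
    simp only [List.mem_nil_iff, false_or, List.mem_map, ih]
    constructor
    · rintro (⟨j, hj0, hjt, k, hk, he⟩ | ⟨y, ⟨j, hj0, hjt, k, hk, he⟩, hy⟩)
      · exact ⟨j, hj0, by omega, k, hk, he⟩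
      · refine ⟨j + (t + 1), by omega, by omega, k, hk, ?_⟩
        rw [← hy, he]; ring
    · rintro ⟨j, hj0, hjc, k, hk, he⟩
      by_cases hj : j ≤ max t 0
      · exact Or.inl ⟨j, hj0, hj, k, hk, he⟩
      · refine Or.inr ⟨k + w * (j - (t + 1)), ⟨j - (t + 1), by omega, by omega, k, hk, rfl⟩, ?_⟩
        rw [he]; ring
  | case3 c hc hodd ih =>
    intro x
    rw [mem_pvUnion]
    simp only [List.mem_nil_iff, false_or, List.mem_map, ih]
    constructor
    · rintro (⟨j, hj0, hjt, k, hk, he⟩ | ⟨k, hk, he⟩)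
      · exact ⟨j, hj0, by omega, k, hk, he⟩
      · exact ⟨c, by omega, by omega, k, hk, by rw [← he]; ring⟩
    · rintro ⟨j, hj0, hjc, k, hk, he⟩
      by_cases hj : j ≤ max (c - 1) 0
      · exact Or.inl ⟨j, hj0, hj, k, hk, he⟩
      · have : j = c := by omega
        subst this
        exact Or.inr ⟨k, hk, by rw [he]; ring⟩

lemma pairwise_pvExpand : ∀ (res : List Int) (w c : Int),
    res.Pairwise (· < ·) → (pvExpand res w c).Pairwise (· < ·) := by
  intro res w c h
  fun_induction pvExpand res w c with
  | case1 => exact h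
  | case2 c hc hodd t u ih =>
    have hu : u = pvExpand res w t := rfl
    rw [hu]
    refine pairwise_pvUnion [] _ _ (by simp) ih ?_ (by simp) (by simp)
    exact (List.pairwise_map.2 (ih.imp (fun hlt => by omega)))
  | case3 c hc hodd ih =>
    refine pairwise_pvUnion [] _ _ (by simp) ih ?_ (by simp) (by simp)
    exact (List.pairwise_map.2 (h.imp (fun hlt => by omega)))

lemma memB_loop :
    ∀ (L : List (Int × Int)) (S : List Int) (P : Int → Prop),
      (∀ p ∈ L, 0 ≤ p.2) → (∀ y, y ∈ S ↔ P y) →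
      ∀ x, x ∈ L.foldl pvStepB S ↔ ∃ y, P y ∧ pvR L (x - y) := by
  intro L
  induction L with
  | nil =>
    intro S P _ hS x
    simp only [List.foldl_nil, pvR, hS]
    constructor
    · exact fun h => ⟨x, h, by omega⟩
    · rintro ⟨y, hy, he⟩
      have : y = x := by omega
      exact this ▸ hy
  | cons p t ih =>
    obtain ⟨w, c⟩ := p
    intro S P hpos hS x
    have hc : 0 ≤ c := hpos (w, c) (by simp)
    simp only [List.foldl_cons]
    have hS' : ∀ z, z ∈ pvStepB S (w, c) ↔
        ∃ y, P y ∧ ∃ j : Int, 0 ≤ j ∧ j ≤ c ∧ z = y + w * j := by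
      intro z
      rw [show pvStepB S (w, c) = pvExpand S w c from rfl, mem_pvExpand]
      constructor
      · rintro ⟨j, hj0, hjc, k, hk, he⟩
        exact ⟨k, (hS k).1 hk, j, hj0, by omega, he⟩
      · rintro ⟨y, hy, j, hj0, hjc, he⟩
        exact ⟨j, hj0, by omega, y, (hS y).2 hy, he⟩
    rw [ih _ _ (fun q hq => hpos q (by simp [hq])) hS' x]
    constructor
    · rintro ⟨z, ⟨y, hy, j, hj0, hjc, hz⟩, hR⟩
      subst hz
      refine ⟨y, hy, j, hj0, hjc, ?_⟩
      have : x - (y + w * j) = x - y - w * j := by ring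
      rwa [this] at hR
    · rintro ⟨y, hy, j, hj0, hjc, hR⟩
      refine ⟨y + w * j, ⟨y, hy, j, hj0, hjc, rfl⟩, ?_⟩
      have : x - (y + w * j) = x - y - w * j := by ring
      rwa [this]

lemma nodupB (L : List (Int × Int)) (S : List Int) (hS : S.Pairwise (· < ·)) :
    (L.foldl pvStepB S).Nodup := by
  have hp : (L.foldl pvStepB S).Pairwise (· < ·) := by
    induction L generalizing S with
    | nil => exact hS
    | cons p t ih => exact ih _ (pairwise_pvExpand S p.1 p.2 hS)
  exact hp.imp (fun h => ne_of_lt h)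

lemma nodupA (weight num : List Int) (is : List Int) :
    ((is.foldl (pvStepA weight num) (PySem.Set.ofList [0]))).Nodup := by
  refine foldl_preserve List.Nodup (pvStepA weight num) ?_ is _ (PySem.Set.nodup_ofList [0])
  intro s i hs
  refine foldl_preserve List.Nodup _ ?_ _ s hs
  intro s2 j hs2
  exact foldl_preserve List.Nodup _ (fun r k hr => PySem.Set.nodup_add r _ hr) s s2 hs2

lemma process_eq_alt (n : Int) (weight num : List Int) :
    process n weight num = process_alt n weight num := by
  rw [process_eq, process_alt_eq]
  have h0 : ∀ x : Int, x ∈ (PySem.Set.ofList [0] : PySem.Set Int) ↔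
      pvR (PySem.Dict.empty : PySem.Dict Int Int).items x := by
    intro x
    rw [PySem.Set.mem_ofList]
    show x ∈ [(0 : Int)] ↔ pvR [] x
    simp [pvR]
  obtain ⟨hA, hndD, hposD⟩ :=
    loop_inv weight num (PySem.List.pyRange 0 n) (PySem.Set.ofList [0]) PySem.Dict.empty
      PySem.Dict.nodup_keys_empty (by intro p hp; cases hp) h0
  have hB := memB_loop ((PySem.List.pyRange 0 n).foldl (pvStepD weight num) PySem.Dict.empty).items
      ([0] : List Int) (fun y => y = 0) hposD (by intro y; simp)
  have hmem : ∀ x, x ∈ (PySem.List.pyRange 0 n).foldl (pvStepA weight num) (PySem.Set.ofList [0]) ↔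
      x ∈ ((PySem.List.pyRange 0 n).foldl (pvStepD weight num) PySem.Dict.empty).items.foldl
        pvStepB [0] := by
    intro x
    rw [hA, hB]
    constructor
    · intro h; exact ⟨0, rfl, by rwa [sub_zero]⟩
    · rintro ⟨y, rfl, h⟩; rwa [sub_zero] at h
  have hperm := (List.perm_ext_iff_of_nodup (nodupA weight num _)
    (nodupB _ _ (by simp))).2 hmem
  show ((_ : List Int).length : Int) = ((_ : List Int).length : Int)
  rw [hperm.length_eq]

-- ===== VERDICT (by name: the statement is the Claim_ definition above) =====
theorem process_spec : Claim_equal_process := by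
  intro n weight num _hdom _hpre
  unfold Spec_process
  exact process_eq_alt n weight num
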